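-- pv_equiv track=rewrite | github.com/lesleytomosada/codewars | python/6 kyu/2023-07-13_character_with_longest_consecutive_repetition.py | longest_repetition
-- ===== SOURCE A (Python) =====
-- def longest_repetition(chars):
--     max_char, max_count = "", 0
--     char, count = "", 0
--     for c in chars:
--         if c != char:
--             count, char = 0, c
--         count += 1
--         if count > max_count:
--             max_char, max_count = char, count
--     return max_char, max_count
-- ===== SOURCE B (Python) =====
-- def longest_repetition(chars):
--     # Staged approach: build the per-position consecutive-run-length array,
--     # then take its maximum and the first position attaining it.
--     runs = []
--     prev = None
--     r = 0
--     for c in chars: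
--         r = r + 1 if c == prev else 1
--         prev = c
--         runs.append(r)
--     if not runs:
--         return "", 0
--     m = max(runs)
--     i = runs.index(m)
--     return chars[i], m
-- ===== Notes on version B (the rewrite author's own statement) =====
-- stated objective: alternative
-- what changed: Instead of tracking the best run in a single pass, B first materialises the array of run lengths ending at each position (r[i] = r[i-1]+1 or 1), then finds the run length by max() and the character by the first index attaining it.
import Mathlib
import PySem

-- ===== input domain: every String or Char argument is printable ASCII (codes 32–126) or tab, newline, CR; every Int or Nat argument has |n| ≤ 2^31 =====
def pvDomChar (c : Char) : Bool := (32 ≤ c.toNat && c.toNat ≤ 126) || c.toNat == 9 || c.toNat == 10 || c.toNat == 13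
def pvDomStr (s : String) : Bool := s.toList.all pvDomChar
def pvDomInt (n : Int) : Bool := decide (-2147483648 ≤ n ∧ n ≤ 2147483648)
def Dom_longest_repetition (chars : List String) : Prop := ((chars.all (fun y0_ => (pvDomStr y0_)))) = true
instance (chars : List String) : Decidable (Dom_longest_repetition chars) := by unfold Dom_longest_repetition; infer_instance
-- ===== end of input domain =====

-- B replaces A's single-pass best-run tracking by a staged computation: the
-- per-position run-length array, then max() and the first index attaining it
-- (alternative decomposition, same O(n) cost).

-- ===== PORT A =====
-- A's loop body: state ((max_char, max_count), char, count)
def stepA (s : (String × Int) × String × Int) (c : String) : (String × Int) × String × Int :=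
  let best := s.1
  let ch := s.2.1
  let cnt := s.2.2
  let p := if c ≠ ch then ((0 : Int), c) else (cnt, ch)
  let cnt' := p.1 + 1
  if cnt' > best.2 then ((p.2, cnt'), p.2, cnt') else (best, p.2, cnt')

def longest_repetition (chars : List String) : String × Int :=
  (chars.foldl stepA (("", 0), "", 0)).1

-- ===== PORT B =====
-- Source B's loop body: state (runs, prev, r); runs.append mirrors the Python append
def runsStep (s : List Int × Option String × Int) (c : String) : List Int × Option String × Int :=
  let r' := if some c = s.2.1 then s.2.2 + 1 else 1
  (s.1 ++ [r'], some c, r')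

def longest_repetition_alt (chars : List String) : String × Int :=
  let s := chars.foldl runsStep ([], (none : Option String), (0 : Int))
  if s.1 = [] then ("", 0)
  else
    match PySem.List.max? s.1 (fun x => x) with
    | none => ("", 0)      -- unreachable: runs ≠ []
    | some m =>
      match PySem.List.index? s.1 m with
      | none => ("", 0)    -- unreachable: m ∈ runs
      | some i =>
        match PySem.List.pyGet? chars (i : Int) with
        | none => ("", 0)  -- unreachable: 0 ≤ i < len(chars)
        | some ch => (ch, m)

-- ===== PRECONDITION & SPEC =====
def Spec_longest_repetition (chars : List String) (out : String × Int) : Prop := out = longest_repetition_alt chars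
instance (chars : List String) (out : String × Int) : Decidable (Spec_longest_repetition chars out) := by unfold Spec_longest_repetition; infer_instance

-- ===== CLAIM (what is proved, stated in full; the proofs are below) =====
def Claim_equal_longest_repetition : Prop := ∀ (chars : List String), Dom_longest_repetition chars → Spec_longest_repetition chars (longest_repetition chars)

-- ===== LEMMAS AND PROOFS =====

-- max over an Int list extended by one element on the right
theorem max?_append_singleton (R : List Int) (m x : Int)
    (h : PySem.List.max? R (fun y => y) = some m) :
    PySem.List.max? (R ++ [x]) (fun y => y) = some (max m x) := by
  rcases R with _ | ⟨a, t⟩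
  · simp [PySem.List.max?] at h
  · rw [PySem.List.max?_id_cons] at h
    have hm : t.foldl max a = m := by simpa using h
    rw [List.cons_append, PySem.List.max?_id_cons, List.foldl_append, hm]
    simp

-- the joint loop invariant: after processing p, A's state and B's (runs, prev, r)
-- state describe each other, and A's best is exactly B's staged extraction on p
def JointInv (p : List String) : Prop :=
  let S := p.foldl runsStep ([], (none : Option String), (0 : Int))
  let T := p.foldl stepA (("", 0), "", 0)
  S.2.1 = p.getLast? ∧
  T.2.1 = p.getLast?.getD "" ∧
  T.2.2 = S.2.2 ∧
  S.1.length = p.length ∧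
  (S.1 = [] → T.1 = ("", 0)) ∧
  (S.1 ≠ [] → ∃ m i ch, PySem.List.max? S.1 (fun x => x) = some m ∧
      PySem.List.index? S.1 m = some i ∧
      PySem.List.pyGet? p (i : Int) = some ch ∧ T.1 = (ch, m))

theorem inv_holds : ∀ p : List String, JointInv p := by
  intro p
  induction p using List.reverseRecOn with
  | nil => refine ⟨rfl, rfl, rfl, rfl, fun _ => rfl, fun h => absurd rfl h⟩
  | append_singleton p c ih =>
    obtain ⟨hprev, hch, hcnt, hlen, hnil, hcons⟩ := ih
    set S := p.foldl runsStep ([], (none : Option String), (0 : Int)) with hS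
    set T := p.foldl stepA (("", 0), "", 0) with hT
    have hSfold : (p ++ [c]).foldl runsStep ([], (none : Option String), (0 : Int)) = runsStep S c := by
      rw [List.foldl_append]; rfl
    have hTfold : (p ++ [c]).foldl stepA (("", 0), "", 0) = stepA T c := by
      rw [List.foldl_append]; rfl
    -- the new run length
    set r' : Int := if some c = S.2.1 then S.2.2 + 1 else 1 with hr'
    have hSnew : runsStep S c = (S.1 ++ [r'], some c, r') := rfl
    -- the reset-or-continue pair A computes is (r' - 1, c)
    have hp : (if c ≠ T.2.1 then ((0 : Int), c) else (T.2.2, T.2.1)) = (r' - 1, c) := by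
      rcases p with _ | ⟨d, q⟩
      · -- p = []: prev = none, ch = "", r' = 1
        have hS0 : S = ([], none, 0) := rfl
        have hT0 : T = (("", 0), "", 0) := rfl
        have hr1 : r' = 1 := by rw [hr', hS0]; simp
        by_cases hc : c = ""
        · subst hc; simp [hT0, hr1]
        · simp [hT0, hc, hr1]
      · -- p ≠ []: prev = some (last p), ch = last p
        have hne : d :: q ≠ ([] : List String) := by simp
        have hl : (d :: q).getLast? = some ((d :: q).getLast hne) :=
          List.getLast?_eq_some_getLast hne
        rw [hl] at hprev hch
        simp only [Option.getD_some] at hch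
        by_cases hc : c = (d :: q).getLast hne
        · have hr : r' = T.2.2 + 1 := by rw [hr', hprev, hcnt]; simp [hc]
          rw [hch, if_neg (by simp [hc]), hr, hc]
          simp
        · have hr : r' = 1 := by rw [hr', hprev]; simp [hc]
          rw [hch, if_pos (by simp [hc]), hr]
          norm_num
    -- hence A's step keeps char = c, count = r', and updates best iff r' > max_count
    have hstepA : stepA T c = ((if r' > T.1.2 then (c, r') else T.1), c, r') := by
      simp only [stepA, hp]
      rw [show r' - 1 + 1 = r' by ring]
      split_ifs <;> rfl
    refine ⟨?_, ?_, ?_, ?_, ?_, ?_⟩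
    · rw [hSfold, hSnew]; simp
    · rw [hTfold, hstepA]; simp
    · rw [hSfold, hTfold, hSnew, hstepA]
    · rw [hSfold, hSnew]; simp [hlen]
    · rw [hSfold, hSnew]; simp
    · intro _
      rw [hSfold, hTfold, hSnew, hstepA]
      rcases eq_or_ne S.1 [] with hR | hR
      · -- first element: p = [], best becomes (c, r') with r' = 1 > 0
        have hp : p = [] := List.eq_nil_of_length_eq_zero (by rw [← hlen, hR]; rfl)
        have hT1 : T.1 = ("", 0) := hnil hR
        have hr1 : r' = 1 := by
          rw [hr', hprev, hp]; simp
        refine ⟨1, 0, c, ?_, ?_, ?_, ?_⟩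
        · rw [hR]; simp [PySem.List.max?, hr1]
        · rw [hR, hr1]; simp [PySem.List.index?]
        · rw [hp]; simp
        · rw [hT1, hr1]; simp
      · obtain ⟨m, i, ch, hmax, hidx, hget, hbest⟩ := hcons hR
        have hall : ∀ y ∈ S.1, y ≤ m := PySem.List.max?_isMax hmax
        by_cases hgt : r' > m
        · -- new run strictly longest: best becomes (c, r') found at index p.length
          have hnotmem : r' ∉ S.1 := fun hm => absurd (hall _ hm) (by omega)
          refine ⟨r', S.1.length, c, ?_, ?_, ?_, ?_⟩
          · rw [max?_append_singleton S.1 m r' hmax]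
            congr 1; omega
          · exact PySem.List.index?_append_singleton_self S.1 r' hnotmem
          · have : PySem.List.pyGet? (p ++ [c]) ((p.length : Nat) : Int) = (p ++ [c])[p.length]? :=
              PySem.List.pyGet?_natCast _ _
            rw [hlen, this]
            simp
          · have hgt' : (ch, m).2 < r' := by simpa using hgt
            simp [hbest, hgt']
        · -- max unchanged, first index unchanged
          have hle : r' ≤ m := by omega
          have hmem : m ∈ S.1 := PySem.List.max?_mem hmax
          obtain ⟨hilt, -, -⟩ := PySem.List.getElem_of_index?_eq_some hidx
          refine ⟨m, i, ch, ?_, ?_, ?_, ?_⟩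
          · rw [max?_append_singleton S.1 m r' hmax]
            congr 1; omega
          · rw [PySem.List.index?_append_of_mem _ hmem, hidx]
          · rw [PySem.List.pyGet?_natCast] at hget ⊢
            rw [List.getElem?_append_left (by omega : i < p.length)]
            exact hget
          · have hle' : ¬ (ch, m).2 < r' := by simpa using hgt
            simp [hbest, hle']

theorem main_eq (chars : List String) : longest_repetition chars = longest_repetition_alt chars := by
  obtain ⟨-, -, -, -, hnil, hcons⟩ := inv_holds chars
  unfold longest_repetition longest_repetition_alt
  rcases eq_or_ne (chars.foldl runsStep ([], (none : Option String), (0 : Int))).1 [] with hR | hR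
  · rw [hnil hR]
    simp [hR]
  · obtain ⟨m, i, ch, hmax, hidx, hget, hbest⟩ := hcons hR
    rw [hbest]
    simp only [hmax, hidx, hget, if_neg hR]

-- ===== VERDICT (by name: the statement is the Claim_ definition above) =====
theorem longest_repetition_spec : Claim_equal_longest_repetition := by
  intro chars _
  exact main_eq chars
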